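-- pv_equiv track=rewrite | github.com/ggfincke/Simple-Amazon-CAPTCHA-Solver | selenium_captcha_solver.py | _fix_common_errors
-- ===== SOURCE A (Python) =====
-- def _fix_common_errors(text):
--     # remove spaces & non-alphanumeric characters
--     text = ''.join(char for char in text if char.isalnum()).upper()
--
--     # common substitutions for OCR errors in Amazon captchas
--     replacements = {
--         '0': 'O',
--         '1': 'I',
--         '5': 'S',
--         '8': 'B',
--     }
--
--     # apply replacements - needs better tuning based on observations of actual Amazon captcha behavior
--     for error, correction in replacements.items():
--         text = text.replace(error, correction)
--
--     return text
-- ===== SOURCE B (Python) =====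
-- _REPLACEMENTS = {'0': 'O', '1': 'I', '5': 'S', '8': 'B'}
--
-- def _fix_common_errors(text):
--     # single pass: keep alnum chars, uppercase each, substitute via the OCR map
--     return ''.join(_REPLACEMENTS.get(c.upper(), c.upper()) for c in text if c.isalnum())
-- ===== Notes on version B (the rewrite author's own statement) =====
-- stated objective: simpler
-- what changed: Replaces A's build-string-then-four-sequential-replace-passes with a single per-character pass: filter isalnum, uppercase, and substitute each char through the OCR dict in one comprehension.
import Mathlib
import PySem

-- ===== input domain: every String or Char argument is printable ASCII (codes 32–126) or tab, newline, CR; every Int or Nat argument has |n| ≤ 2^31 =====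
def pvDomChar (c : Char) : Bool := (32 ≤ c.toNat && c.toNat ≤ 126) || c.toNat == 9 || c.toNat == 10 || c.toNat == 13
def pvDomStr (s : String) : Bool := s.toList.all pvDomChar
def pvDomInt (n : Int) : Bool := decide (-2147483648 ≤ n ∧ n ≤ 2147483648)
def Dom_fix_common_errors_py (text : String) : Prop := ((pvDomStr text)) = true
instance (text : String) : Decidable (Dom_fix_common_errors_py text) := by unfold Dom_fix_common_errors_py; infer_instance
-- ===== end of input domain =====

-- B replaces A's four sequential replace passes with a single per-character filter/uppercase/substitute pass (objective: simpler).


-- ===== PORT A =====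
def fix_common_errors_py (text : String) : String :=
  -- text = ''.join(char for char in text if char.isalnum()).upper()
  let text1 := PySem.Str.upper (String.ofList (text.toList.filter PySem.Chars.isalnum))
  -- replacements dict, then: for error, correction in replacements.items(): text = text.replace(error, correction)
  let replacements : List (String × String) := [("0", "O"), ("1", "I"), ("5", "S"), ("8", "B")]
  replacements.foldl (fun t p => PySem.Str.replace t p.1 p.2) text1

-- ===== PORT B =====
def pvReplMap : PySem.Dict Char Char := PySem.Dict.ofList [('0', 'O'), ('1', 'I'), ('5', 'S'), ('8', 'B')]

def fix_common_errors_py_alt (text : String) : String :=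
  String.ofList (text.toList.filterMap (fun c =>
    if PySem.Chars.isalnum c then
      some (PySem.Dict.getD pvReplMap (PySem.Chars.upperChar c) (PySem.Chars.upperChar c))
    else none))

-- ===== PRECONDITION & SPEC =====
def Spec_fix_common_errors_py (text : String) (out : String) : Prop := out = fix_common_errors_py_alt text
instance (text : String) (out : String) : Decidable (Spec_fix_common_errors_py text out) := by unfold Spec_fix_common_errors_py; infer_instance

-- ===== CLAIM (what is proved, stated in full; the proofs are below) =====
def Claim_equal_fix_common_errors_py : Prop := ∀ (text : String), Dom_fix_common_errors_py text → Spec_fix_common_errors_py text (fix_common_errors_py text)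

-- ===== LEMMAS AND PROOFS =====

-- single-char replace is a map over the characters
theorem replace_go_single (o n : Char) : ∀ (l acc : List Char) (fuel : Nat), l.length ≤ fuel →
    PySem.Chars.replace.go [o] [n] fuel l acc = acc.reverse ++ l.map (fun c => if c == o then n else c) := by
  intro l
  induction l with
  | nil =>
      intro acc fuel _
      cases fuel <;> simp [PySem.Chars.replace.go]
  | cons c t ih =>
      intro acc fuel hf
      cases fuel with
      | zero => simp at hf
      | succ m =>
        simp only [PySem.Chars.replace.go]
        by_cases hco : c = o
        · subst hco
          have : [c].isPrefixOf (c :: t) = true := by simp [List.isPrefixOf]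
          simp only [this, if_true, List.length_cons] at *
          simp only [List.length_nil, Nat.zero_add, List.drop_succ_cons, List.drop_zero]
          rw [ih _ m (by omega)]
          simp
        · have hpre : [o].isPrefixOf (c :: t) = false := by
            simp [List.isPrefixOf]; exact fun h => absurd h.symm hco
          simp only [hpre, Bool.false_eq_true, if_false]
          rw [ih _ m (by simpa using Nat.le_of_succ_le_succ hf)]
          simp [hco]

theorem replace_single (s : List Char) (o n : Char) :
    PySem.Chars.replace s [o] [n] = s.map (fun c => if c == o then n else c) := by
  simp only [PySem.Chars.replace, List.isEmpty]
  rw [replace_go_single o n s [] s.length le_rfl]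
  simp

theorem filterMap_if_eq_map_filter (p : Char → Bool) (h : Char → Char) (l : List Char) :
    l.filterMap (fun c => if p c then some (h c) else none) = (l.filter p).map h := by
  induction l with
  | nil => rfl
  | cons c t ih => by_cases hc : p c <;> simp [List.filter_cons, hc, ih]

theorem subst_char (u : Char) :
    (if (if (if (if u == '0' then 'O' else u) == '1' then 'I'
        else if u == '0' then 'O' else u) == '5' then 'S'
        else if (if u == '0' then 'O' else u) == '1' then 'I'
        else if u == '0' then 'O' else u) == '8' then 'B'
        else if (if (if u == '0' then 'O' else u) == '1' then 'I'
        else if u == '0' then 'O' else u) == '5' then 'S'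
        else if (if u == '0' then 'O' else u) == '1' then 'I'
        else if u == '0' then 'O' else u)
      = PySem.Dict.getD pvReplMap u u := by
  by_cases h0 : u = '0'
  · subst h0; decide
  by_cases h1 : u = '1'
  · subst h1; decide
  by_cases h5 : u = '5'
  · subst h5; decide
  by_cases h8 : u = '8'
  · subst h8; decide
  have e0 : (u == '0') = false := by simp [h0]
  have e1 : (u == '1') = false := by simp [h1]
  have e5 : (u == '5') = false := by simp [h5]
  have e8 : (u == '8') = false := by simp [h8]
  have hm : pvReplMap = ((((PySem.Dict.empty.insert '0' 'O').insert '1' 'I').insert '5' 'S').insert '8' 'B') := by decide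
  rw [hm, PySem.Dict.getD_insert_of_ne _ _ _ h8, PySem.Dict.getD_insert_of_ne _ _ _ h5,
      PySem.Dict.getD_insert_of_ne _ _ _ h1, PySem.Dict.getD_insert_of_ne _ _ _ h0]
  simp [e0, e1, e5, e8, PySem.Dict.getD, PySem.Dict.get?, PySem.Dict.empty]

-- ===== VERDICT (by name: the statement is the Claim_ definition above) =====
theorem fix_common_errors_py_spec : Claim_equal_fix_common_errors_py := by
  intro text _
  unfold Spec_fix_common_errors_py fix_common_errors_py fix_common_errors_py_alt
  simp only [List.foldl_cons, List.foldl_nil]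
  rw [filterMap_if_eq_map_filter]
  simp only [PySem.Str.replace, PySem.Str.upper, PySem.Chars.upper]
  have l0 : ("0" : String).toList = ['0'] := rfl
  have l1 : ("1" : String).toList = ['1'] := rfl
  have l5 : ("5" : String).toList = ['5'] := rfl
  have l8 : ("8" : String).toList = ['8'] := rfl
  have lO : ("O" : String).toList = ['O'] := rfl
  have lI : ("I" : String).toList = ['I'] := rfl
  have lS : ("S" : String).toList = ['S'] := rfl
  have lB : ("B" : String).toList = ['B'] := rfl
  simp only [l0, l1, l5, l8, lO, lI, lS, lB, String.toList_ofList,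
    replace_single, List.map_map]
  refine congrArg _ (List.map_congr_left fun c _ => ?_)
  simpa [Function.comp] using subst_char (PySem.Chars.upperChar c)
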